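-- pv_equiv track=rewrite | github.com/readloud/Atlas | tamper/general_percentage.py | general_percentage
-- ===== SOURCE A (Python) =====
-- import string
--
-- def general_percentage(payload):
-- 	# -- general -- #
-- 	if payload:
-- 		_payload = ""
-- 		i = 0
-- 		while i < len(payload):
-- 			if payload[i] == '%' and (i<len(payload)-2) and payload[i+1:i+2] in string.hexdigits and payload[i+2:i+3] in string.hexdigits:
-- 				_payload += payload[i:i+3]
-- 				i += 3
-- 			elif payload[i] != ' ':
-- 				_payload += '%%%s'%payload[i]
-- 				i += 1
-- 			else:
-- 				_payload += payload[i]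
-- 				i += 1
-- 	return _payload
-- ===== SOURCE B (Python) =====
-- import re
-- import string
--
-- _PAT = re.compile(r'%[0-9a-fA-F]{2}|.', re.DOTALL)
--
-- def _repl(m):
--     s = m.group()
--     if len(s) == 3 or s == ' ':
--         return s
--     return '%' + s
--
-- def general_percentage(payload):
--     return _PAT.sub(_repl, payload)
-- ===== Notes on version B (the rewrite author's own statement) =====
-- stated objective: faster
-- what changed: Replaces the manual index-stepping while-loop with quadratic string concatenation by a single re.sub whose pattern matches an existing percent-hex escape or (DOTALL) any single character, and whose replacer keeps escapes and spaces and percent-prefixes everything else.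
import Mathlib
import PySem

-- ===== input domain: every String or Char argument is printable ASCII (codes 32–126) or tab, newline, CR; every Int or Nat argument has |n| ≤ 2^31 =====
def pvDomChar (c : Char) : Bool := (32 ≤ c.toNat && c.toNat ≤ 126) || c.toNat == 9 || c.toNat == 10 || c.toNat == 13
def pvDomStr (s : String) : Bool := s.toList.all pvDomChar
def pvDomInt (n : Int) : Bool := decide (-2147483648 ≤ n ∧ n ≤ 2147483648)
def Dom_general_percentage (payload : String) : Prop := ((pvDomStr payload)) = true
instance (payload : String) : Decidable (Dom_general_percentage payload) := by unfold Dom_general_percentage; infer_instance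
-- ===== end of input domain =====

-- B replaces A's manual index-stepping while-loop by a regex-style tokenizer
-- (re.sub of '%[0-9a-fA-F]{2}|.' with a replacer), same return value;
-- A raises on the empty payload, which Pre_ excludes.


-- ===== PORT A =====
-- string.hexdigits
def pvHexdigits : List Char :=
  ['0','1','2','3','4','5','6','7','8','9','a','b','c','d','e','f','A','B','C','D','E','F']

-- the while-loop of A: index i, accumulator _payload
def pvALoop (cs : List Char) (i : Nat) (acc : List Char) : List Char :=
  if h : i < cs.length then
    if cs[i] = '%' ∧ ((i : Int) < (cs.length : Int) - 2)
        ∧ PySem.Chars.isIn (PySem.List.slice cs (some ((i : Int) + 1)) (some ((i : Int) + 2))) pvHexdigits = true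
        ∧ PySem.Chars.isIn (PySem.List.slice cs (some ((i : Int) + 2)) (some ((i : Int) + 3))) pvHexdigits = true then
      pvALoop cs (i + 3) (acc ++ PySem.List.slice cs (some (i : Int)) (some ((i : Int) + 3)))
    else if cs[i] ≠ ' ' then
      pvALoop cs (i + 1) (acc ++ ['%', cs[i]])
    else
      pvALoop cs (i + 1) (acc ++ [cs[i]])
  else acc
termination_by cs.length - i

def general_percentage (payload : String) : String :=
  -- 'if payload:' — on empty payload Python raises UnboundLocalError (excluded by Pre_)
  if payload.toList ≠ [] then String.ofList (pvALoop payload.toList 0 []) else ""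

-- ===== PORT B =====
-- the regex character class [0-9a-fA-F] (the same characters as string.hexdigits)
def pvIsHexB (c : Char) : Bool := pvHexdigits.contains c

-- the replacer _repl of Source B
def pvRepl (s : List Char) : List Char :=
  if s.length = 3 then s else if s = [' '] then s else '%' :: s

-- re.sub(r'%[0-9a-fA-F]{2}|.', _repl, payload, re.DOTALL): at each position the
-- scanner first tries the escape alternative, otherwise '.' consumes one char
def pvBScan (cs : List Char) : List Char :=
  match cs with
  | [] => []
  | '%' :: h1 :: h2 :: rest' =>
      if pvIsHexB h1 && pvIsHexB h2 then pvRepl ['%', h1, h2] ++ pvBScan rest'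
      else pvRepl ['%'] ++ pvBScan (h1 :: h2 :: rest')
  | c :: rest => pvRepl [c] ++ pvBScan rest

def general_percentage_alt (payload : String) : String :=
  String.ofList (pvBScan payload.toList)

-- ===== PRECONDITION & SPEC =====
-- Pre_ excludes only the empty string, on which A raises UnboundLocalError.
def Pre_general_percentage (payload : String) : Prop := payload ≠ ""
instance (payload : String) : Decidable (Pre_general_percentage payload) := by
  unfold Pre_general_percentage; infer_instance

def pvWitness_general_percentage : String := "a% b"

def Spec_general_percentage (payload : String) (out : String) : Prop := out = general_percentage_alt payload
instance (payload : String) (out : String) : Decidable (Spec_general_percentage payload out) := by unfold Spec_general_percentage; infer_instance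

-- ===== CLAIM (what is proved, stated in full; the proofs are below) =====
def Claim_equal_general_percentage : Prop := ∀ (payload : String), Dom_general_percentage payload → Pre_general_percentage payload → Spec_general_percentage payload (general_percentage payload)

-- ===== LEMMAS AND PROOFS =====

lemma pvIsIn_singleton_iff (x : Char) (l : List Char) :
    PySem.Chars.isIn [x] l = true ↔ x ∈ l := by
  rw [PySem.Chars.isIn_iff_infix]
  constructor
  · intro h; exact h.subset (by simp)
  · intro h
    obtain ⟨s, t, rfl⟩ := List.append_of_mem h
    exact ⟨s, t, by simp⟩

lemma pvHexB_iff (x : Char) : pvIsHexB x = true ↔ x ∈ pvHexdigits := by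
  simp [pvIsHexB, pvHexdigits]

lemma pvSliceSingleton (cs : List Char) (j : Nat) (hj : j < cs.length) :
    PySem.List.slice cs (some (j : Int)) (some ((j : Int) + 1)) = [cs[j]] := by
  rw [PySem.List.slice_toNat cs (a := (j : Int)) (b := (j : Int) + 1) (by omega) (by omega)]
  have h1 : ((j : Int)).toNat = j := by omega
  have h2 : (((j : Int) + 1)).toNat = j + 1 := by omega
  rw [h1, h2, List.drop_eq_getElem_cons hj, show j + 1 - j = 1 from by omega]
  rfl

lemma pvSliceTriple (cs : List Char) (j : Nat) (hj : j + 3 ≤ cs.length) :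
    PySem.List.slice cs (some (j : Int)) (some ((j : Int) + 3)) =
      [cs[j]'(by omega), cs[j+1]'(by omega), cs[j+2]'(by omega)] := by
  rw [PySem.List.slice_toNat cs (a := (j : Int)) (b := (j : Int) + 3) (by omega) (by omega)]
  have h1 : ((j : Int)).toNat = j := by omega
  have h2 : (((j : Int) + 3)).toNat = j + 3 := by omega
  rw [h1, h2, List.drop_eq_getElem_cons (show j < cs.length by omega),
      List.drop_eq_getElem_cons (show j + 1 < cs.length by omega),
      List.drop_eq_getElem_cons (show j + 2 < cs.length by omega),
      show j + 3 - j = 3 from by omega]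
  rfl

lemma pvBScan_esc (h1 h2 : Char) (t : List Char) (hh : (pvIsHexB h1 && pvIsHexB h2) = true) :
    pvBScan ('%' :: h1 :: h2 :: t) = '%' :: h1 :: h2 :: pvBScan t := by
  simp [pvBScan, pvRepl, hh]

lemma pvBScan_pct (t : List Char)
    (hnot : ∀ h1 h2 t', t = h1 :: h2 :: t' → (pvIsHexB h1 && pvIsHexB h2) = false) :
    pvBScan ('%' :: t) = '%' :: '%' :: pvBScan t := by
  match t with
  | [] => simp [pvBScan, pvRepl]
  | [d] => simp [pvBScan, pvRepl]
  | d1 :: d2 :: t' => simp [pvBScan, pvRepl, hnot d1 d2 t' rfl]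

lemma pvBScan_space (t : List Char) : pvBScan (' ' :: t) = ' ' :: pvBScan t := by
  simp [pvBScan, pvRepl]

lemma pvBScan_other (c : Char) (t : List Char) (hc : c ≠ '%') (hs : c ≠ ' ') :
    pvBScan (c :: t) = '%' :: c :: pvBScan t := by
  simp [pvBScan, pvRepl, hc, hs]

lemma pvKey (cs : List Char) : ∀ n i acc, cs.length - i ≤ n →
    pvALoop cs i acc = acc ++ pvBScan (cs.drop i) := by
  intro n
  induction n with
  | zero =>
    intro i acc hn
    rw [pvALoop, dif_neg (by omega), List.drop_eq_nil_of_le (by omega)]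
    simp [pvBScan]
  | succ n ih =>
    intro i acc hn
    by_cases h : i < cs.length
    · have hd : cs.drop i = cs[i] :: cs.drop (i + 1) := List.drop_eq_getElem_cons h
      have e1 : (i : Int) + 1 = ((i + 1 : Nat) : Int) := by push_cast; ring
      have e2 : (i : Int) + 2 = ((i + 1 : Nat) : Int) + 1 := by push_cast; ring
      have e2' : (i : Int) + 2 = ((i + 2 : Nat) : Int) := by push_cast; ring
      have e3 : (i : Int) + 3 = ((i + 2 : Nat) : Int) + 1 := by push_cast; ring
      rw [pvALoop, dif_pos h]
      by_cases hesc : cs[i] = '%' ∧ ((i : Int) < (cs.length : Int) - 2)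
          ∧ PySem.Chars.isIn (PySem.List.slice cs (some ((i : Int) + 1)) (some ((i : Int) + 2))) pvHexdigits = true
          ∧ PySem.Chars.isIn (PySem.List.slice cs (some ((i : Int) + 2)) (some ((i : Int) + 3))) pvHexdigits = true
      · rw [if_pos hesc]
        obtain ⟨hc, hlen, hx1, hx2⟩ := hesc
        have h3 : i + 3 ≤ cs.length := by omega
        rw [e1, e2, pvSliceSingleton cs (i+1) (by omega)] at hx1
        rw [e2', e3, pvSliceSingleton cs (i+2) (by omega)] at hx2
        have hb1 : pvIsHexB (cs[i+1]'(by omega)) = true :=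
          (pvHexB_iff _).mpr ((pvIsIn_singleton_iff _ _).mp hx1)
        have hb2 : pvIsHexB (cs[i+2]'(by omega)) = true :=
          (pvHexB_iff _).mpr ((pvIsIn_singleton_iff _ _).mp hx2)
        have hd1 : cs.drop (i + 1) = cs[i+1]'(by omega) :: cs.drop (i + 2) :=
          List.drop_eq_getElem_cons (by omega)
        have hd2 : cs.drop (i + 2) = cs[i+2]'(by omega) :: cs.drop (i + 3) :=
          List.drop_eq_getElem_cons (by omega)
        rw [pvSliceTriple cs i h3, ih (i + 3) _ (by omega), hd, hd1, hd2, hc,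
          pvBScan_esc _ _ _ (by rw [hb1, hb2]; rfl)]
        simp
      · rw [if_neg hesc]
        by_cases hc : cs[i] = '%'
        · -- '%' that does not start a kept escape: A emits "%%"
          have hnot : ∀ d1 d2 t', cs.drop (i + 1) = d1 :: d2 :: t' →
              (pvIsHexB d1 && pvIsHexB d2) = false := by
            intro d1 d2 t' ht
            have hlen2 : i + 3 ≤ cs.length := by
              have := congrArg List.length ht
              simp [List.length_drop] at this
              omega
            have hd1 : cs.drop (i + 1) = cs[i+1]'(by omega) :: cs.drop (i + 2) :=
              List.drop_eq_getElem_cons (by omega)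
            have hd2 : cs.drop (i + 2) = cs[i+2]'(by omega) :: cs.drop (i + 3) :=
              List.drop_eq_getElem_cons (by omega)
            rw [ht] at hd1
            obtain ⟨hde1, htail⟩ := List.cons_eq_cons.mp hd1.symm
            rw [hd2] at htail
            obtain ⟨hde2, -⟩ := List.cons_eq_cons.mp htail.symm
            cases hb : (pvIsHexB d1 && pvIsHexB d2) with
            | false => rfl
            | true =>
              exfalso
              have hb1 := (Bool.and_eq_true _ _).mp hb
              apply hesc
              refine ⟨hc, by omega, ?_, ?_⟩
              · rw [e1, e2, pvSliceSingleton cs (i+1) (by omega)]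
                exact (pvIsIn_singleton_iff _ _).mpr ((pvHexB_iff _).mp (hde1 ▸ hb1.1))
              · rw [e2', e3, pvSliceSingleton cs (i+2) (by omega)]
                exact (pvIsIn_singleton_iff _ _).mpr ((pvHexB_iff _).mp (hde2 ▸ hb1.2))
          rw [if_pos (by rw [hc]; decide), ih (i + 1) _ (by omega), hd, hc,
            pvBScan_pct _ hnot]
          simp
        · by_cases hsp : cs[i] = ' '
          · rw [if_neg (by simp [hsp]), ih (i + 1) _ (by omega), hd, hsp, pvBScan_space]
            simp
          · rw [if_pos hsp, ih (i + 1) _ (by omega), hd, pvBScan_other _ _ hc hsp]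
            simp
    · rw [pvALoop, dif_neg (by omega), List.drop_eq_nil_of_le (by omega)]
      simp [pvBScan]

-- ===== VERDICT (by name: the statement is the Claim_ definition above) =====
theorem general_percentage_spec : Claim_equal_general_percentage := by
  intro payload _ hpre
  unfold Spec_general_percentage general_percentage general_percentage_alt
  have hne : payload.toList ≠ [] := fun h => hpre (String.toList_eq_nil_iff.mp h)
  rw [if_pos hne, pvKey payload.toList (payload.toList.length) 0 [] (by omega)]
  simp
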